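-- pv_equiv track=rewrite | github.com/reedhaffner/advent-of-code-2018 | day5/day5.py | destroy
-- ===== SOURCE A (Python) =====
-- def destroy(string):
--     newlines = [""]
--     for letter in string:
--         lastletter = newlines[-1]
--         if not lastletter == letter and lastletter.lower() == letter.lower():
--             newlines.pop()
--         else:
--             newlines.append(letter)
--     return len(newlines) - 1
-- ===== SOURCE B (Python) =====
-- def _first_pair(s):
--     for i in range(len(s) - 1):
--         a, b = s[i], s[i + 1]
--         if a != b and a.lower() == b.lower():
--             return i
--     return -1
--
--
-- def destroy(string):
--     s = string
--     i = _first_pair(s)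
--     while i != -1:
--         s = s[:i] + s[i + 2:]
--         i = _first_pair(s)
--     return len(s)
-- ===== Notes on version B (the rewrite author's own statement) =====
-- stated objective: alternative
-- what changed: Replaces A's single left-to-right stack pass with a fixpoint loop that repeatedly rescans the string for the first adjacent reactive pair and splices it out until none remains (the reduction is confluent, so the final length agrees).
import Mathlib
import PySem

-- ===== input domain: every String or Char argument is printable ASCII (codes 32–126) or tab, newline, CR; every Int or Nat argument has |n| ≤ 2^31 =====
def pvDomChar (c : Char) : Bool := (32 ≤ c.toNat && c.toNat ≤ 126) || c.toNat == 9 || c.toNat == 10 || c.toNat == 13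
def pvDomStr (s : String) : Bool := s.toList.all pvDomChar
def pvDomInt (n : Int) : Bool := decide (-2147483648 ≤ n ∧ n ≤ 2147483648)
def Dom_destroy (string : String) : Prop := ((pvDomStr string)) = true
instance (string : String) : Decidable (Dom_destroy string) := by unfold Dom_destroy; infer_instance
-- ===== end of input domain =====

-- B replaces A's single stack pass by a fixpoint loop that repeatedly removes the first
-- adjacent reactive pair until none remains (alternative algorithm, not faster).

-- ===== PORT A =====
-- A's stack `newlines` is kept top-first (head = newlines[-1]); it starts [""] and is never
-- empty ("" never satisfies the pop condition), so headD's default "" is unreachable.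
def destroyLoop : List String → List Char → List String
  | news, [] => news
  | news, c :: cs =>
    let letter := String.ofList [c]          -- iterating a Python str yields 1-char strings
    let lastletter := news.headD ""          -- newlines[-1]
    if lastletter ≠ letter ∧ PySem.Str.lower lastletter = PySem.Str.lower letter
    then destroyLoop news.tail cs            -- newlines.pop()
    else destroyLoop (letter :: news) cs     -- newlines.append(letter)

def destroy (string : String) : Int :=
  ((destroyLoop [""] string.toList).length : Int) - 1

-- ===== PORT B =====
-- a != b and a.lower() == b.lower() on single characters
def reactChar (a b : Char) : Bool :=
  decide (a ≠ b ∧ PySem.Chars.lowerChar a = PySem.Chars.lowerChar b)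

-- _first_pair: scan i = 0,1,… and return the first reactive index (none = Python's -1)
def firstPair : List Char → Option Nat
  | a :: b :: rest => if reactChar a b then some 0 else (firstPair (b :: rest)).map (· + 1)
  | _ => none

theorem firstPair_some_le : ∀ {l : List Char} {i : Nat}, firstPair l = some i → i + 2 ≤ l.length
  | a :: b :: rest, i, h => by
    by_cases hr : reactChar a b
    · simp [firstPair, hr] at h
      simp only [List.length_cons]; omega
    · simp [firstPair, hr] at h
      obtain ⟨j, hj, rfl⟩ := h
      have := firstPair_some_le hj
      simp only [List.length_cons] at this ⊢; omega

-- the while-loop of B: splice out the first reactive pair, rescan, until none is left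
-- (s[:i] and s[i+2:] with 0 ≤ i are exactly take/drop)
def reduceB (l : List Char) : List Char :=
  match h : firstPair l with
  | none => l
  | some i => reduceB (l.take i ++ l.drop (i + 2))
termination_by l.length
decreasing_by
  have := firstPair_some_le h
  simp; omega

def destroy_alt (string : String) : Int :=
  ((reduceB string.toList).length : Int)

-- ===== PRECONDITION & SPEC =====
def Spec_destroy (string : String) (out : Int) : Prop := out = destroy_alt string
instance (string : String) (out : Int) : Decidable (Spec_destroy string out) := by unfold Spec_destroy; infer_instance

-- ===== CLAIM (what is proved, stated in full; the proofs are below) =====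
def Claim_equal_destroy : Prop := ∀ (string : String), Dom_destroy string → Spec_destroy string (destroy string)

-- ===== LEMMAS AND PROOFS =====

-- the canonical one-pass stack step; both programs' results are related to `List.foldl stepC []`
def stepC (S : List Char) (c : Char) : List Char :=
  match S with
  | [] => [c]
  | t :: r => if reactChar t c then r else c :: t :: r

-- irreducible stack: no two adjacent entries react
def Irr (S : List Char) : Prop := List.IsChain (fun a b => reactChar a b = false) S

theorem char_toNat_inj {a b : Char} (h : a.toNat = b.toNat) : a = b := by
  rw [← Char.ofNat_toNat a, h, Char.ofNat_toNat]

theorem isupper_toNat {c : Char} (h : PySem.Chars.isupper c = true) :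
    65 ≤ c.toNat ∧ c.toNat ≤ 90 := by
  simp only [PySem.Chars.isupper, Bool.and_eq_true, decide_eq_true_eq] at h
  exact h

theorem lowerChar_toNat_of_upper {c : Char} (h : PySem.Chars.isupper c = true) :
    (PySem.Chars.lowerChar c).toNat = c.toNat + 32 := by
  have hb := isupper_toNat h
  simp only [PySem.Chars.lowerChar, h, if_true, Char.toNat_ofNat]
  rw [if_pos (Or.inl (by omega))]

theorem lowerChar_of_not_upper {c : Char} (h : ¬ PySem.Chars.isupper c = true) :
    PySem.Chars.lowerChar c = c := by
  simp [PySem.Chars.lowerChar, h]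

theorem lower_eq_cases {a b : Char} (h : PySem.Chars.lowerChar a = PySem.Chars.lowerChar b)
    (hne : a ≠ b) :
    (PySem.Chars.isupper a = true ∧ ¬ PySem.Chars.isupper b = true ∧ b.toNat = a.toNat + 32) ∨
    (PySem.Chars.isupper b = true ∧ ¬ PySem.Chars.isupper a = true ∧ a.toNat = b.toNat + 32) := by
  by_cases ha : PySem.Chars.isupper a = true <;> by_cases hb : PySem.Chars.isupper b = true
  · exfalso; apply hne; apply char_toNat_inj
    have := congrArg Char.toNat h
    rw [lowerChar_toNat_of_upper ha, lowerChar_toNat_of_upper hb] at this; omega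
  · left
    refine ⟨ha, hb, ?_⟩
    have := congrArg Char.toNat h
    rw [lowerChar_toNat_of_upper ha, lowerChar_of_not_upper hb] at this; omega
  · right
    refine ⟨hb, ha, ?_⟩
    have := congrArg Char.toNat h
    rw [lowerChar_of_not_upper ha, lowerChar_toNat_of_upper hb] at this; omega
  · exfalso; apply hne
    rw [← lowerChar_of_not_upper ha, h, lowerChar_of_not_upper hb]

-- the crux: reacting partners are unique — t reacts with x and x with y forces t = y
theorem react_react {t x y : Char} (h1 : reactChar t x = true) (h2 : reactChar x y = true) :
    t = y := by
  simp only [reactChar, decide_eq_true_eq] at h1 h2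
  obtain ⟨hne1, hl1⟩ := h1
  obtain ⟨hne2, hl2⟩ := h2
  rcases lower_eq_cases hl1 hne1 with ⟨hu1, hn1, he1⟩ | ⟨hu1, hn1, he1⟩ <;>
    rcases lower_eq_cases hl2 hne2 with ⟨hu2, hn2, he2⟩ | ⟨hu2, hn2, he2⟩
  · exact absurd hu2 hn1
  · exact char_toNat_inj (by omega)
  · exact char_toNat_inj (by omega)
  · exact absurd hu1 hn2

theorem reactChar_symm (a b : Char) : reactChar a b = reactChar b a := by
  simp only [reactChar]
  exact decide_eq_decide.mpr (by tauto)

theorem irr_step {S : List Char} (h : Irr S) (c : Char) : Irr (stepC S c) := by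
  match S with
  | [] => simp only [stepC]; exact List.isChain_singleton c
  | t :: r =>
    simp only [stepC]
    by_cases hr : reactChar t c
    · simpa [hr] using h.tail
    · rw [if_neg hr]
      rw [Bool.not_eq_true] at hr
      exact List.isChain_cons_cons.mpr ⟨by rw [reactChar_symm]; exact hr, h⟩

theorem step_step {S : List Char} {x y : Char} (hS : Irr S) (hxy : reactChar x y = true) :
    stepC (stepC S x) y = S := by
  match S with
  | [] => simp [stepC, hxy]
  | t :: r =>
    simp only [stepC]
    by_cases hx : reactChar t x
    · simp only [hx, if_true]
      have hty : t = y := react_react hx hxy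
      match r with
      | [] => simp [hty]
      | u :: r' =>
        have htu : reactChar t u = false := hS.rel_head
        have : reactChar u y = false := by rw [← hty, reactChar_symm]; exact htu
        simp [this, hty]
    · rw [if_neg hx]
      simp [hxy]

theorem irr_foldl : ∀ (l : List Char) (S : List Char), Irr S → Irr (List.foldl stepC S l)
  | [], S, h => h
  | c :: cs, S, h => irr_foldl cs _ (irr_step h c)

theorem fold_insert {x y : Char} (hxy : reactChar x y = true) (u v : List Char) :
    List.foldl stepC [] (u ++ x :: y :: v) = List.foldl stepC [] (u ++ v) := by
  rw [List.foldl_append, List.foldl_append]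
  have hIrr : Irr (List.foldl stepC [] u) := irr_foldl u [] (by simp [Irr])
  simp only [List.foldl_cons]
  rw [step_step hIrr hxy]

theorem firstPair_spec : ∀ {l : List Char} {i : Nat}, firstPair l = some i →
    ∃ a b, l = l.take i ++ a :: b :: l.drop (i + 2) ∧ reactChar a b = true
  | a :: b :: rest, i, h => by
    by_cases hr : reactChar a b
    · simp only [firstPair, hr, if_true, Option.some.injEq] at h
      subst h
      exact ⟨a, b, by simp, hr⟩
    · simp [firstPair, hr] at h
      obtain ⟨j, hj, rfl⟩ := h
      obtain ⟨x, y, hx, hxy⟩ := firstPair_spec hj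
      refine ⟨x, y, ?_, hxy⟩
      simpa [List.take_succ_cons, List.drop_succ_cons] using congrArg (a :: ·) hx

theorem nf_reduceB (l : List Char) :
    List.foldl stepC [] (reduceB l) = List.foldl stepC [] l := by
  fun_induction reduceB l with
  | case1 l h => rfl
  | case2 l i h ih =>
    obtain ⟨a, b, hl, hab⟩ := firstPair_spec h
    rw [ih]
    conv_rhs => rw [hl]
    exact (fold_insert hab _ _).symm

theorem firstPair_none_chain : ∀ {l : List Char}, firstPair l = none →
    List.IsChain (fun a b => reactChar a b = false) l
  | [], _ => by simp
  | [a], _ => by simp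
  | a :: b :: r, h => by
    by_cases hr : reactChar a b
    · simp [firstPair, hr] at h
    · simp [firstPair, hr] at h
      exact List.isChain_cons_cons.mpr ⟨by simpa using hr, firstPair_none_chain h⟩

theorem reduceB_none (l : List Char) : firstPair (reduceB l) = none := by
  fun_induction reduceB l with
  | case1 l h => exact h
  | case2 l i h ih => exact ih

-- an irreducible list just gets pushed: the fold reverses it onto the stack
theorem fold_chain : ∀ (l : List Char) (S : List Char),
    List.IsChain (fun a b => reactChar a b = false) l →
    (∀ t r c cs, S = t :: r → l = c :: cs → reactChar t c = false) →
    List.foldl stepC S l = l.reverse ++ S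
  | [], _, _, _ => by simp
  | c :: rest, S, hch, hcomp => by
    simp only [List.foldl_cons]
    cases S with
    | nil =>
      rw [show stepC [] c = [c] from rfl]
      rw [fold_chain rest [c] hch.tail ?_]
      · simp
      · rintro t r c' cs' ht rfl
        injection ht with ht hr
        subst ht
        exact hch.rel_head
    | cons t r =>
      have hfc : reactChar t c = false := hcomp t r c rest rfl rfl
      rw [show stepC (t :: r) c = c :: t :: r from by simp [stepC, hfc]]
      rw [fold_chain rest (c :: t :: r) hch.tail ?_]
      · simp
      · rintro t' r' c' cs' ht rfl
        injection ht with ht hr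
        subst ht
        exact hch.rel_head

-- A's loop over 1-char strings mirrors the char-level stack fold
theorem bridgeA : ∀ (cs : List Char) (S : List Char),
    destroyLoop (S.map (fun c => String.ofList [c]) ++ [""]) cs
      = (List.foldl stepC S cs).map (fun c => String.ofList [c]) ++ [""]
  | [], _ => by simp [destroyLoop]
  | c :: rest, S => by
    cases S with
    | nil =>
      have hcond : ¬ (("" : String) ≠ String.ofList [c] ∧
          PySem.Str.lower "" = PySem.Str.lower (String.ofList [c])) := by
        rintro ⟨-, h⟩
        have := congrArg String.toList h
        simp [PySem.Str.toList_lower, PySem.Chars.lower] at this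
      simp only [List.map_nil, List.nil_append, destroyLoop, List.headD, List.tail]
      rw [if_neg hcond]
      rw [show (String.ofList [c] :: [("" : String)])
            = ([c].map (fun c => String.ofList [c]) ++ [""]) from rfl]
      rw [bridgeA rest [c]]
      rfl
    | cons t r =>
      have hiff : ((String.ofList [t] ≠ String.ofList [c]) ∧
          PySem.Str.lower (String.ofList [t]) = PySem.Str.lower (String.ofList [c]))
          ↔ reactChar t c = true := by
        simp [reactChar, String.ext_iff, PySem.Str.toList_lower, PySem.Chars.lower]
      simp only [List.map_cons, List.cons_append, destroyLoop, List.headD, List.tail]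
      by_cases hr : reactChar t c
      · rw [if_pos (hiff.mpr hr)]
        rw [bridgeA rest r]
        rw [List.foldl_cons, show stepC (t :: r) c = r from by simp [stepC, hr]]
      · rw [if_neg (fun hc => hr (hiff.mp hc))]
        rw [show (String.ofList [c] :: String.ofList [t] :: (r.map (fun c => String.ofList [c]) ++ [""]))
              = ((c :: t :: r).map (fun c => String.ofList [c]) ++ [""]) from rfl]
        rw [bridgeA rest (c :: t :: r)]
        rw [List.foldl_cons, show stepC (t :: r) c = c :: t :: r from by simp [stepC, hr]]

-- ===== VERDICT (by name: the statement is the Claim_ definition above) =====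
theorem destroy_spec : Claim_equal_destroy := by
  intro s _
  unfold Spec_destroy destroy destroy_alt
  have hA := bridgeA s.toList []
  simp only [List.map_nil, List.nil_append] at hA
  rw [hA]
  have h1 : List.foldl stepC [] s.toList = List.foldl stepC [] (reduceB s.toList) :=
    (nf_reduceB s.toList).symm
  have h2 : List.foldl stepC [] (reduceB s.toList) = (reduceB s.toList).reverse := by
    have := fold_chain (reduceB s.toList) [] (firstPair_none_chain (reduceB_none s.toList))
      (by intro t r c cs h; simp at h)
    simpa using this
  rw [h1, h2]
  simp
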